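-- pv_equiv track=rewrite | github.com/mumi/java-serverless-bench | serverlessbench/azure.py | _extract_appsettings
-- ===== SOURCE A (Python) =====
-- def _extract_appsettings(data: dict):
--     account_name = None
--     account_key = None
--     app_insights_instrumentation_key = None
--
--     def extract_value_from_connection_string(connection_string, key):
--         parts = connection_string.split(';')
--         for part in parts:
--             if part.startswith(key + '='):
--                 return part.split('=', 1)[1]
--         return None
--
--     for item in data:
--         if item['name'] == 'APPINSIGHTS_INSTRUMENTATIONKEY':
--             app_insights_instrumentation_key = item['value']
--         elif item['name'] == 'AzureWebJobsStorage':
--             connection_string = item['value']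
--             account_name = extract_value_from_connection_string(connection_string, 'AccountName')
--             account_key = extract_value_from_connection_string(connection_string, 'AccountKey')
--
--     return account_name, account_key, app_insights_instrumentation_key
-- ===== SOURCE B (Python) =====
-- def _extract_appsettings(data: dict):
--     def find_last_value(name):
--         # backward scan with early exit: the last occurrence wins
--         for item in reversed(data):
--             if item['name'] == name:
--                 return item['value']
--         return None
--
--     def extract_value_from_connection_string(connection_string, key):
--         parts = connection_string.split(';')
--         for part in parts:
--             if part.startswith(key + '='):
--                 return part.split('=', 1)[1]
--         return None
--
--     app_insights_instrumentation_key = find_last_value('APPINSIGHTS_INSTRUMENTATIONKEY')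
--     connection_string = find_last_value('AzureWebJobsStorage')
--     account_name = None
--     account_key = None
--     if connection_string is not None:
--         account_name = extract_value_from_connection_string(connection_string, 'AccountName')
--         account_key = extract_value_from_connection_string(connection_string, 'AccountKey')
--     return account_name, account_key, app_insights_instrumentation_key
-- ===== Notes on version B (the rewrite author's own statement) =====
-- stated objective: alternative
-- what changed: Replaces A's single forward accumulating pass with two staged backward searches with early exit (last matching item found first from the end), so no accumulator state is carried and the storage connection string is parsed only once instead of on every AzureWebJobsStorage item.
import Mathlib
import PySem

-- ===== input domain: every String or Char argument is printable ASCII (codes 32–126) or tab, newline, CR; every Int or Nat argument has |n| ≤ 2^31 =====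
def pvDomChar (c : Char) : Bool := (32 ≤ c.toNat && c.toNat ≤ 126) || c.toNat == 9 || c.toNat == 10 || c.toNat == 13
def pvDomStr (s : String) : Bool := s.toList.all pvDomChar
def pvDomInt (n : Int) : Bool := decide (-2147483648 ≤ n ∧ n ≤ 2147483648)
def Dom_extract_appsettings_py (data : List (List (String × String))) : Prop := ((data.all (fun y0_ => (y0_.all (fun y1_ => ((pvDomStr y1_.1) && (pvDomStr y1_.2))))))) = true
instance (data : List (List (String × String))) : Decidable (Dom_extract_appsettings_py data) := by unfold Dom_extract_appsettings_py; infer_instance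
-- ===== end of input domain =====

-- B replaces A's single forward accumulating pass by two staged backward searches with
-- early exit (last matching item is found first from the end); objective: alternative.

-- ===== PORT A =====
-- inner helper `extract_value_from_connection_string` (identical in A and in B):
-- scan the ';'-parts, on the first part starting with key+'=' return part.split('=',1)[1]
def pvExtractCS_scan (parts : List String) (key : String) : Option String :=
  match parts with
  | [] => none
  | p :: rest =>
    if PySem.Str.startswith p (key ++ "=") then
      PySem.List.pyGet? ((PySem.Str.splitMax? p "=" 1).getD []) 1
    else pvExtractCS_scan rest key

def pvExtractCS (connection_string : String) (key : String) : Option String :=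
  pvExtractCS_scan ((PySem.Str.split? connection_string ";").getD []) key  -- ";" ≠ "" so split? is some

-- the main loop of A: one forward fold over the items, dispatching on item['name']
def extract_appsettings_py (data : List (List (String × String))) : Option String × Option String × Option String :=
  data.foldl
    (fun st item =>
      match (PySem.Dict.mk item).get? "name" with
      | none => st        -- unreachable under Pre_ (Python raises KeyError)
      | some nm =>
        if nm = "APPINSIGHTS_INSTRUMENTATIONKEY" then
          (st.1, st.2.1, (PySem.Dict.mk item).get? "value")
        else if nm = "AzureWebJobsStorage" then
          match (PySem.Dict.mk item).get? "value" with
          | none => st    -- unreachable under Pre_ (Python raises KeyError)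
          | some cs => (pvExtractCS cs "AccountName", pvExtractCS cs "AccountKey", st.2.2)
        else st)
    (none, none, none)

-- ===== PORT B =====
-- `find_last_value(name)`: scan reversed(data), return the first item whose 'name' matches
def pvFindVal : List (List (String × String)) → String → Option String
  | [], _ => none
  | item :: rest, name =>
    match (PySem.Dict.mk item).get? "name" with
    | none => pvFindVal rest name   -- unreachable under Pre_ (Python raises KeyError)
    | some nm =>
      if nm = name then (PySem.Dict.mk item).get? "value"  -- none unreachable under Pre_
      else pvFindVal rest name

def extract_appsettings_py_alt (data : List (List (String × String))) : Option String × Option String × Option String :=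
  let app_insights := pvFindVal data.reverse "APPINSIGHTS_INSTRUMENTATIONKEY"
  match pvFindVal data.reverse "AzureWebJobsStorage" with
  | none => (none, none, app_insights)
  | some cs => (pvExtractCS cs "AccountName", pvExtractCS cs "AccountKey", app_insights)

-- ===== PRECONDITION & SPEC =====
-- Pre_ excludes exactly the inputs on which Python A raises KeyError: an item without a
-- 'name' key, or an item named one of the two target names without a 'value' key.
def pvItemOk (item : List (String × String)) : Bool :=
  match (PySem.Dict.mk item).get? "name" with
  | none => false
  | some nm =>
    if nm = "APPINSIGHTS_INSTRUMENTATIONKEY" ∨ nm = "AzureWebJobsStorage" then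
      ((PySem.Dict.mk item).get? "value").isSome
    else true

def Pre_extract_appsettings_py (data : List (List (String × String))) : Prop :=
  data.all pvItemOk = true
instance (data : List (List (String × String))) : Decidable (Pre_extract_appsettings_py data) := by
  unfold Pre_extract_appsettings_py; infer_instance

def pvWitness_extract_appsettings_py : (List (List (String × String))) :=
  [[("name", "AzureWebJobsStorage"), ("value", "AccountName=foo;AccountKey=bar")],
   [("name", "APPINSIGHTS_INSTRUMENTATIONKEY"), ("value", "k")],
   [("name", "other"), ("x", "y")]]

def Spec_extract_appsettings_py (data : List (List (String × String))) (out : Option String × Option String × Option String) : Prop := out = extract_appsettings_py_alt data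
instance (data : List (List (String × String))) (out : Option String × Option String × Option String) : Decidable (Spec_extract_appsettings_py data out) := by unfold Spec_extract_appsettings_py; infer_instance

-- ===== CLAIM (what is proved, stated in full; the proofs are below) =====
def Claim_equal_extract_appsettings_py : Prop := ∀ (data : List (List (String × String))), Dom_extract_appsettings_py data → Pre_extract_appsettings_py data → Spec_extract_appsettings_py data (extract_appsettings_py data)

-- ===== LEMMAS AND PROOFS =====

theorem pv_main : ∀ (data : List (List (String × String))),
    Pre_extract_appsettings_py data →
    extract_appsettings_py data = extract_appsettings_py_alt data := by
  intro data
  induction data using List.reverseRecOn with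
  | nil => intro _; rfl
  | append_singleton xs x ih =>
    intro hpre
    rw [Pre_extract_appsettings_py, List.all_append] at hpre
    simp only [Bool.and_eq_true, List.all_cons, List.all_nil, Bool.and_true] at hpre
    obtain ⟨hxs, hx⟩ := hpre
    have ih' := ih hxs
    have hA : extract_appsettings_py (xs ++ [x]) =
        (fun st item =>
          match (PySem.Dict.mk item).get? "name" with
          | none => st
          | some nm =>
            if nm = "APPINSIGHTS_INSTRUMENTATIONKEY" then
              (st.1, st.2.1, (PySem.Dict.mk item).get? "value")
            else if nm = "AzureWebJobsStorage" then
              match (PySem.Dict.mk item).get? "value" with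
              | none => st
              | some cs => (pvExtractCS cs "AccountName", pvExtractCS cs "AccountKey", st.2.2)
            else st) (extract_appsettings_py xs) x := by
      simp [extract_appsettings_py, List.foldl_append]
    have hrev : (xs ++ [x]).reverse = x :: xs.reverse := by simp
    cases hnm : (PySem.Dict.mk x).get? "name" with
    | none => rw [pvItemOk, hnm] at hx; exact absurd hx (by simp)
    | some nm =>
      rw [hA]; simp only [hnm]
      by_cases h1 : nm = "APPINSIGHTS_INSTRUMENTATIONKEY"
      · subst h1
        rw [if_pos rfl, ih']
        simp only [extract_appsettings_py_alt, hrev, pvFindVal, hnm,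
          if_neg (by decide : ¬ ("APPINSIGHTS_INSTRUMENTATIONKEY" = "AzureWebJobsStorage"))]
        cases pvFindVal xs.reverse "AzureWebJobsStorage" <;> simp
      · rw [if_neg h1]
        by_cases h2 : nm = "AzureWebJobsStorage"
        · subst h2
          rw [if_pos rfl]
          simp [pvItemOk, hnm] at hx
          obtain ⟨cs, hv⟩ := Option.isSome_iff_exists.mp hx
          rw [hv, ih']
          simp only [extract_appsettings_py_alt, hrev, pvFindVal, hnm,
            if_neg (by decide : ¬ ("AzureWebJobsStorage" = "APPINSIGHTS_INSTRUMENTATIONKEY")), hv]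
          cases pvFindVal xs.reverse "AzureWebJobsStorage" <;> simp
        · rw [if_neg h2, ih']
          simp only [extract_appsettings_py_alt, hrev, pvFindVal, hnm, if_neg h1, if_neg h2]

-- ===== VERDICT (by name: the statement is the Claim_ definition above) =====
theorem extract_appsettings_py_spec : Claim_equal_extract_appsettings_py := by
  intro data _ hpre
  exact pv_main data hpre
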